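-- pv_equiv track=rewrite | github.com/Popygai4ik/files | ХЛАМ/Jopa/Жопа со срезами практика 28 ч 1/1.py | is_special_number
-- ===== SOURCE A (Python) =====
-- def is_special_number(num):
--     """Check if a number is a special number according to the problem."""
--     if num >= 0:
--         return False
--     num_base7 = ''
--     num_abs = abs(num)
--     while num_abs > 0:
--         num_base7 = str(num_abs % 7) + num_base7
--         num_abs //= 7
--     return num_base7.startswith('3')
-- ===== SOURCE B (Python) =====
-- def is_special_number(num):
--     """Check if a number is a special number according to the problem."""
--     if num >= 0:
--         return False
--     num_abs = abs(num)
--     while num_abs >= 7: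
--         num_abs //= 7
--     return num_abs == 3
-- ===== Notes on version B (the rewrite author's own statement) =====
-- stated objective: simpler
-- what changed: B never builds the base-7 digit string: it divides away all but the most significant base-seven digit and tests whether that digit equals three, instead of accumulating str(digit) prefixes and calling startswith.
import Mathlib
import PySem

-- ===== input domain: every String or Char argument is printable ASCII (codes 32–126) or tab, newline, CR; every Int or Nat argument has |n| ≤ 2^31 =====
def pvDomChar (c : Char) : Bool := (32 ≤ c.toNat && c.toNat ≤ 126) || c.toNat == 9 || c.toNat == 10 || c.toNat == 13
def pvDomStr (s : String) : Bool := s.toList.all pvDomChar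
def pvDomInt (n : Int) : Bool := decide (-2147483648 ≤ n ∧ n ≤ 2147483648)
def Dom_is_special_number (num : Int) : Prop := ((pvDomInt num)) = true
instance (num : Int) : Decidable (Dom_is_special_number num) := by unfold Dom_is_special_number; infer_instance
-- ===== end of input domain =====

-- B replaces the base-7 digit-string accumulation of A by dividing down to the
-- single leading base-7 digit and comparing it with 3 (objective: simpler).

-- ===== PORT A =====
-- the while-loop of A; num_abs = abs(num) is nonnegative, so it is carried as a Nat
-- (n % 7 and n // 7 on nonnegative ints coincide with Nat % and /, exact here)
def isSpecialLoopA (n : Nat) (acc : String) : String :=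
  if 0 < n then isSpecialLoopA (n / 7) (PySem.Int.toStr ((n % 7 : Nat) : Int) ++ acc) else acc
termination_by n
decreasing_by exact Nat.div_lt_self (by omega) (by omega)

def is_special_number (num : Int) : Bool :=
  if num ≥ 0 then false
  else PySem.Str.startswith (isSpecialLoopA num.natAbs "") "3"

-- ===== PORT B =====
-- the while-loop of B; num_abs = abs(num) is nonnegative, so it is carried as a Nat
def isSpecialLoopB (n : Nat) : Nat :=
  if 7 ≤ n then isSpecialLoopB (n / 7) else n
termination_by n
decreasing_by exact Nat.div_lt_self (by omega) (by omega)

def is_special_number_alt (num : Int) : Bool :=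
  if num ≥ 0 then false
  else isSpecialLoopB num.natAbs == 3

-- ===== PRECONDITION & SPEC =====
def Spec_is_special_number (num : Int) (out : Bool) : Prop := out = is_special_number_alt num
instance (num : Int) (out : Bool) : Decidable (Spec_is_special_number num out) := by unfold Spec_is_special_number; infer_instance

-- ===== CLAIM (what is proved, stated in full; the proofs are below) =====
def Claim_equal_is_special_number : Prop := ∀ (num : Int), Dom_is_special_number num → Spec_is_special_number num (is_special_number num)

-- ===== LEMMAS AND PROOFS =====

-- the accumulated string starts with '3' iff the leading base-7 digit is 3
theorem isSpecialLoopA_startswith (n : Nat) (hn : 0 < n) (acc : String) :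
    PySem.Str.startswith (isSpecialLoopA n acc) "3" = (isSpecialLoopB n == 3) := by
  induction n using Nat.strong_induction_on generalizing acc with
  | _ n ih =>
    rw [isSpecialLoopA, isSpecialLoopB]
    by_cases h7 : 7 ≤ n
    · have hdiv : 0 < n / 7 := Nat.div_pos h7 (by omega)
      rw [if_pos hn, if_pos h7]
      exact ih (n / 7) (Nat.div_lt_self hn (by omega)) hdiv _
    · -- single digit: n < 7, n / 7 = 0, result is toStr n ++ acc
      rw [if_pos hn, if_neg h7]
      have h0 : n / 7 = 0 := Nat.div_eq_of_lt (by omega)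
      have hm : n % 7 = n := Nat.mod_eq_of_lt (by omega)
      rw [h0, hm, isSpecialLoopA, if_neg (lt_irrefl 0)]
      -- startswith (toStr n ++ acc) "3" = (n == 3) for 1 ≤ n ≤ 6
      interval_cases n <;>
        simp [PySem.Str.startswith, PySem.Chars.startswith, List.isPrefixOf,
              (by decide : PySem.Int.toChars 1 = ['1']),
              (by decide : PySem.Int.toChars 2 = ['2']),
              (by decide : PySem.Int.toChars 3 = ['3']),
              (by decide : PySem.Int.toChars 4 = ['4']),
              (by decide : PySem.Int.toChars 5 = ['5']),
              (by decide : PySem.Int.toChars 6 = ['6'])]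

-- ===== VERDICT (by name: the statement is the Claim_ definition above) =====
theorem is_special_number_spec : Claim_equal_is_special_number := by
  intro num _
  unfold Spec_is_special_number is_special_number is_special_number_alt
  by_cases h : num ≥ 0
  · rw [if_pos h, if_pos h]
  · rw [if_neg h, if_neg h]
    exact isSpecialLoopA_startswith num.natAbs (by omega) ""
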